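-- pv_equiv track=rewrite | github.com/ShiliangTong/AoC2023 | Day14/countRocks.py | CheckWeight
-- ===== SOURCE A (Python) =====
-- def CheckWeight(mapIn : []):
--     sum0 = 0
--     Col = len(mapIn[0])
--     Row = len(mapIn)
--     for i in range(Row):
--         # count how many '0's in the row
--         count = len([char for char in mapIn[i] if char == 'O'])
--         sum0 += count * (Row-i)
--     return sum0
-- ===== SOURCE B (Python) =====
-- def CheckWeight(mapIn : []):
--     total = 0
--     running = 0
--     for row in mapIn:
--         running += row.count('O')
--         total += running
--     return total
-- ===== Notes on version B (the rewrite author's own statement) =====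
-- stated objective: simpler
-- what changed: B replaces the per-row multiplication count*(Row-i) by a running prefix-sum accumulator: each row's O-count (obtained with str.count instead of a filtering list comprehension) is folded into a running total that is added to the result at every row, so no weight is ever computed.
-- outside the precondition, e.g. on CheckWeight([]): A raises IndexError, B returns 0
import Mathlib
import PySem

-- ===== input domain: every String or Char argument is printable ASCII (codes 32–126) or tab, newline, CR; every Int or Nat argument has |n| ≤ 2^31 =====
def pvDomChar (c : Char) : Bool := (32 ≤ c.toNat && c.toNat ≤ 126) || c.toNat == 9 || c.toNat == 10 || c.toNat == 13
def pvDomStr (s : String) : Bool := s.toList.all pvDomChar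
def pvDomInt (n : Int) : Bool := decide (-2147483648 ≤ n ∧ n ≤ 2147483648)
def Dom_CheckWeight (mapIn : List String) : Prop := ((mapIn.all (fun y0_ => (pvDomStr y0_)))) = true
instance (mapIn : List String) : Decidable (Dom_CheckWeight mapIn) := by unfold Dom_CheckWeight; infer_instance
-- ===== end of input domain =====

-- B replaces the weight multiplication count*(Row-i) by a running prefix-sum accumulator (objective: simpler);
-- return-value equivalence is claimed on non-empty grids (A raises IndexError on [] via len(mapIn[0])).


-- ===== PORT A =====
-- count = len([char for char in mapIn[i] if char == 'O'])
def pvCountO (row : String) : Int :=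
  ((row.toList.filter (fun ch => ch == 'O')).length : Int)

-- A computes Col = len(mapIn[0]) (unused; IndexError on an empty grid, excluded by Pre_),
-- then loops i over range(Row) adding count * (Row - i).
def CheckWeight (mapIn : List String) : Int :=
  let Row : Int := (mapIn.length : Int)
  (PySem.List.pyRange 0 Row 1).foldl
    (fun sum0 i => sum0 + pvCountO (PySem.List.pyGetD mapIn i "") * (Row - i)) 0

-- ===== PORT B =====
def CheckWeight_alt (mapIn : List String) : Int :=
  (mapIn.foldl
    (fun (p : Int × Int) row =>
      let running := p.2 + (PySem.Str.count row "O" : Int)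
      (p.1 + running, running)) (0, 0)).1

-- ===== PRECONDITION & SPEC =====
-- A raises IndexError on mapIn = [] (it evaluates len(mapIn[0])).
def Pre_CheckWeight (mapIn : List String) : Prop := mapIn ≠ []
instance (mapIn : List String) : Decidable (Pre_CheckWeight mapIn) := by unfold Pre_CheckWeight; infer_instance
def pvWitness_CheckWeight : List String := ["O.O", "...", ".O."]

def Spec_CheckWeight (mapIn : List String) (out : Int) : Prop := out = CheckWeight_alt mapIn
instance (mapIn : List String) (out : Int) : Decidable (Spec_CheckWeight mapIn out) := by unfold Spec_CheckWeight; infer_instance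

-- ===== CLAIM (what is proved, stated in full; the proofs are below) =====
def Claim_equal_CheckWeight : Prop := ∀ (mapIn : List String), Dom_CheckWeight mapIn → Pre_CheckWeight mapIn → Spec_CheckWeight mapIn (CheckWeight mapIn)

-- ===== LEMMAS AND PROOFS =====

-- The common value: the weighted sum, written as structural recursion on the list of row counts.
def pvW : List Int → Int
  | [] => 0
  | x :: xs => x * ((xs.length : Int) + 1) + pvW xs

-- str.count with a single-character needle counts exactly the matching characters.
theorem pvCount_go_single (c : Char) : ∀ (s : List Char) (fuel acc : Nat), s.length ≤ fuel →
    PySem.Chars.count.go [c] fuel s acc = acc + (s.filter (fun ch => ch == c)).length := by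
  intro s
  induction s with
  | nil => intro fuel acc _; cases fuel <;> simp [PySem.Chars.count.go]
  | cons h t ih =>
      intro fuel acc hle
      cases fuel with
      | zero => simp at hle
      | succ fuel =>
          have hstep : PySem.Chars.count.go [c] (fuel + 1) (h :: t) acc
              = if (c == h) = true then PySem.Chars.count.go [c] fuel t (acc + 1)
                else PySem.Chars.count.go [c] fuel t acc := by
            simp [PySem.Chars.count.go, List.isPrefixOf]
          have hle' : t.length ≤ fuel := by simp at hle; omega
          by_cases hc : (c == h) = true
          · have hc' : (h == c) = true := by simp_all [BEq.comm]
            rw [hstep, if_pos hc, ih fuel (acc + 1) hle']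
            simp [hc']
            omega
          · have hc' : ¬ (h == c) = true := by simp_all [BEq.comm]
            rw [hstep, if_neg hc, ih fuel acc hle']
            simp [hc']

theorem pvStrCount_eq (row : String) : ((PySem.Str.count row "O" : Nat) : Int) = pvCountO row := by
  have : PySem.Str.count row "O" = PySem.Chars.count row.toList ['O'] := by
    simp [PySem.Str.count]
  rw [this]
  simp only [PySem.Chars.count, List.isEmpty_cons, Bool.false_eq_true, if_false]
  rw [pvCount_go_single 'O' row.toList row.toList.length 0 (le_refl _)]
  simp [pvCountO]

-- B's loop: starting from (t, r), the first component ends at t + r·|cs| + pvW cs.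
theorem pvLoopB (cs : List Int) : ∀ (t r : Int),
    (cs.foldl (fun (p : Int × Int) x => (p.1 + (p.2 + x), p.2 + x)) (t, r)).1
      = t + r * (cs.length : Int) + pvW cs := by
  induction cs with
  | nil => intro t r; simp [pvW]
  | cons x xs ih =>
      intro t r
      simp only [List.foldl_cons, pvW, List.length_cons, ih]
      push_cast
      ring

-- A's loop over range(|pre|, |mapIn|) with mapIn = pre ++ tail sums tail's counts with their weights.
theorem pvLoopA (mapIn : List String) : ∀ (tail pre : List String), mapIn = pre ++ tail → ∀ s : Int,
    (PySem.List.pyRange (pre.length : Int) (mapIn.length : Int) 1).foldl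
      (fun sum0 i => sum0 + pvCountO (PySem.List.pyGetD mapIn i "") * ((mapIn.length : Int) - i)) s
      = s + pvW (tail.map pvCountO) := by
  intro tail
  induction tail with
  | nil =>
      intro pre h s
      have : (mapIn.length : Int) ≤ (pre.length : Int) := by simp [h]
      rw [PySem.List.pyRange_one_eq_nil this]
      simp [pvW]
  | cons x xs ih =>
      intro pre h s
      have hlen : mapIn.length = pre.length + xs.length + 1 := by simp [h]; omega
      have hlt : (pre.length : Int) < (mapIn.length : Int) := by
        rw [hlen]; push_cast; omega
      rw [PySem.List.pyRange_one_cons hlt]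
      simp only [List.foldl_cons]
      have hget : PySem.List.pyGetD mapIn (pre.length : Int) "" = x := by
        rw [PySem.List.pyGetD_natCast, h]
        simp [List.getD_eq_getElem?_getD]
      have hstep : ((pre.length : Int) + 1) = ((pre ++ [x]).length : Int) := by
        simp
      rw [hget, hstep, ih (pre ++ [x]) (by simp [h]) _]
      have hw : (mapIn.length : Int) - (pre.length : Int) = (xs.length : Int) + 1 := by
        rw [hlen]; push_cast; ring
      simp only [List.map_cons, pvW, hw, List.length_map]
      ring

theorem pvA_eq (mapIn : List String) : CheckWeight mapIn = pvW (mapIn.map pvCountO) := by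
  have := pvLoopA mapIn mapIn [] (by simp) 0
  simpa [CheckWeight] using this

theorem pvB_eq (mapIn : List String) : CheckWeight_alt mapIn = pvW (mapIn.map pvCountO) := by
  unfold CheckWeight_alt
  have hmap : (mapIn.map (fun row => ((PySem.Str.count row "O" : Nat) : Int)))
      = mapIn.map pvCountO := by
    exact List.map_congr_left (fun row _ => pvStrCount_eq row)
  calc (mapIn.foldl (fun (p : Int × Int) row =>
          (p.1 + (p.2 + (PySem.Str.count row "O" : Int)), p.2 + (PySem.Str.count row "O" : Int))) (0, 0)).1
      = ((mapIn.map (fun row => ((PySem.Str.count row "O" : Nat) : Int))).foldl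
          (fun (p : Int × Int) x => (p.1 + (p.2 + x), p.2 + x)) (0, 0)).1 := by
        rw [List.foldl_map]
    _ = pvW (mapIn.map pvCountO) := by
        rw [hmap, pvLoopB]; simp

-- ===== VERDICT (by name: the statement is the Claim_ definition above) =====
theorem CheckWeight_spec : Claim_equal_CheckWeight := by
  intro mapIn _ _
  unfold Spec_CheckWeight
  rw [pvA_eq, pvB_eq]
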